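-- pv_equiv track=rewrite | github.com/vllm-project/vllm | tool_calling_experiment/generate_insights_report.py | _section_6_per_class
-- ===== SOURCE A (Python) =====
-- from collections import Counter, defaultdict
--
-- SCENE_CLASSES = [
--     "nominal",
--     "flagger",
--     "flooded",
--     "incident_zone",
--     "mounted_police",
-- ]
--
-- def _pct(n, d, dec=1):
--     if d == 0:
--         return "N/A"
--     return f"{100.0 * n / d:.{dec}f}%"
--
-- def _md_table(headers, rows):
--     """Return a markdown table string."""
--     lines = []
--     lines.append("| " + " | ".join(headers) + " |")
--     lines.append(
--         "| " + " | ".join("---" for _ in headers) + " |"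
--     )
--     for row in rows:
--         lines.append(
--             "| " + " | ".join(str(c) for c in row) + " |"
--         )
--     return "\n".join(lines)
--
-- def _section_6_per_class(metrics, all_preds):
--     """Per-Class Impact."""
--     lines = [
--         "## 6. Per-Class Impact",
--         "",
--         "Which scene classes benefit most from "
--         "tool verification?",
--         "",
--     ]
--
--     # Per-condition, per-class accuracy
--     headers = ["Condition"] + SCENE_CLASSES
--     rows = []
--     for eid, m in metrics.items():
--         preds = all_preds.get(eid, [])
--         if not preds:
--             continue
--         gt_counts = Counter(
--             r["scene_type_gt"] for r in preds
--         )
--         correct = Counter()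
--         for r in preds:
--             if r["final_scene"] == r["scene_type_gt"]:
--                 correct[r["scene_type_gt"]] += 1
--         row = [m["condition_name"]]
--         for cls in SCENE_CLASSES:
--             row.append(
--                 _pct(
--                     correct.get(cls, 0),
--                     gt_counts.get(cls, 0),
--                 )
--             )
--         rows.append(row)
--
--     lines.append(_md_table(headers, rows))
--     lines.append("")
--     lines.append(
--         "*Plain language*: Each cell shows what "
--         "percentage of that class the model got "
--         "right. Higher is better. Look for classes "
--         "where tool conditions outperform baseline."
--     )
--     lines.append("")
--     return "\n".join(lines)
-- ===== SOURCE B (Python) =====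
-- SCENE_CLASSES = [
--     "nominal",
--     "flagger",
--     "flooded",
--     "incident_zone",
--     "mounted_police",
-- ]
--
--
-- def _pct(n, d, dec=1):
--     if d == 0:
--         return "N/A"
--     return f"{100.0 * n / d:.{dec}f}%"
--
--
-- def _section_6_per_class(metrics, all_preds):
--     """Per-Class Impact."""
--     # Class-major counting: no Counter/dict aggregation at all.  For each
--     # condition and each scene class, the total and correct counts are taken
--     # by direct filtered scans of the predictions, and each markdown line is
--     # emitted as a finished string (no row-of-cells accumulation).
--     rows = []
--     for eid, m in metrics.items():
--         preds = all_preds.get(eid, [])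
--         if not preds:
--             continue
--         cells = [m["condition_name"]]
--         for cls in SCENE_CLASSES:
--             total = sum(r["scene_type_gt"] == cls for r in preds)
--             correct = sum(
--                 r["final_scene"] == cls
--                 for r in preds
--                 if r["scene_type_gt"] == cls
--             )
--             cells.append(_pct(correct, total))
--         rows.append("| " + " | ".join(cells) + " |")
--     table = "\n".join(
--         ["| " + " | ".join(["Condition"] + SCENE_CLASSES) + " |",
--          "|" + " --- |" * (len(SCENE_CLASSES) + 1)]
--         + rows
--     )
--     return "\n".join([
--         "## 6. Per-Class Impact",
--         "",
--         "Which scene classes benefit most from tool verification?",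
--         "",
--         table,
--         "",
--         "*Plain language*: Each cell shows what percentage of that class "
--         "the model got right. Higher is better. Look for classes where "
--         "tool conditions outperform baseline.",
--         "",
--     ])
-- ===== Notes on version B (the rewrite author's own statement) =====
-- stated objective: alternative
-- what changed: B drops A's hash-counter aggregation (the gt_counts Counter and the correct-counting loop over records) and instead counts class-major: for every scene class it takes total and correct by direct filtered scans of preds, so no counting dict exists at all, and it emits each markdown line as a finished string instead of accumulating rows of cells for the _md_table helper.
import Mathlib
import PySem

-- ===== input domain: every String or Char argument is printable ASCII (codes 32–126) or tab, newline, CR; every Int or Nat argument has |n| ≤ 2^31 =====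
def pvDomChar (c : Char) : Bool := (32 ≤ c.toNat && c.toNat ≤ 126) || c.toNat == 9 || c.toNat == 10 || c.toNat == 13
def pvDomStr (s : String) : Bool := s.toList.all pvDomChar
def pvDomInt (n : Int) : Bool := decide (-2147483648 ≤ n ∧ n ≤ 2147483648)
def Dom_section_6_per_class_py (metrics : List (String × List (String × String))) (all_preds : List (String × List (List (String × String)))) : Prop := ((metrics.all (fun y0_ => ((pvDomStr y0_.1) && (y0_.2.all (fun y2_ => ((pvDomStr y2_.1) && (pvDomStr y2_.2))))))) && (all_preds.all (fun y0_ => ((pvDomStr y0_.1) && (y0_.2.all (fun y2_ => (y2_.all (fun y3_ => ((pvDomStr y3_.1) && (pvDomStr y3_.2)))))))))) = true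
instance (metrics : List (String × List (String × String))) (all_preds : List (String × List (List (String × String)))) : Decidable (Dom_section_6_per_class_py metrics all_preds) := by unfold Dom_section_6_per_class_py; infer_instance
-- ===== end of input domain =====

-- B replaces A's hash-counter aggregation (two Counters built in record-major passes, then
-- looked up per class) with class-major filtered scans — for each class, total and correct are
-- counted directly from preds with no intermediate dict — and emits each markdown line as a
-- finished string instead of accumulating rows of cells for the _md_table helper
-- (objective: alternative decomposition/traversal order).

-- ===== shared module context (SCENE_CLASSES and _pct, used by both Pythons) =====
def pvSceneClasses : List String :=
  ["nominal", "flagger", "flooded", "incident_zone", "mounted_police"]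

-- round-half-even of a/b (b > 0): how both the float division and printf round
def pvRHE (a b : Nat) : Nat :=
  let q := a / b
  let r := a % b
  if 2 * r < b then q else if b < 2 * r then q + 1 else if q % 2 = 0 then q else q + 1

-- _pct(n, d): Python's f"{100.0*n/d:.1f}%". Hand-ported float semantics, exact on the
-- reachable domain (0 ≤ n ≤ d, counts of list elements): 100*n/d is first rounded to a
-- 53-bit IEEE double (mantissa m·2^-k, round-half-even), then printf rounds that exact
-- dyadic value half-even to one decimal digit.
def pvPct (n d : Nat) : String :=
  if d = 0 then "N/A"
  else if n = 0 then "0.0%"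
  else
    let N := 100 * n
    let k := Nat.clog 2 ((2 ^ 52 * d + (N - 1)) / N)
    let m := pvRHE (N * 2 ^ k) d
    let t := pvRHE (10 * m) (2 ^ k)
    PySem.Int.toStr ((t / 10 : Nat) : Int) ++ "." ++ PySem.Int.toStr ((t % 10 : Nat) : Int) ++ "%"

def pvPlain : String :=
  "*Plain language*: Each cell shows what percentage of that class the model got right. Higher is better. Look for classes where tool conditions outperform baseline."

-- ===== PORT A =====
-- _md_table(headers, rows)
def pvMdTable (headers : List String) (rows : List (List String)) : String :=
  PySem.Str.join "\n"
    (("| " ++ PySem.Str.join " | " headers ++ " |")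
      :: ("| " ++ PySem.Str.join " | " (headers.map (fun _ => "---")) ++ " |")
      :: rows.map (fun row => "| " ++ PySem.Str.join " | " row ++ " |"))

def section_6_per_class_py (metrics : List (String × List (String × String))) (all_preds : List (String × List (List (String × String)))) : String :=
  let lines : List String :=
    ["## 6. Per-Class Impact", "",
     "Which scene classes benefit most from tool verification?", ""]
  let headers : List String := "Condition" :: pvSceneClasses
  let rows : List (List String) := metrics.foldl (fun rows em =>
    let preds := (List.lookup em.1 all_preds).getD []
    if preds = [] then rows
    else
      let gt_counts : PySem.Dict String Nat := preds.foldl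
        (fun d r => d.modify ((List.lookup "scene_type_gt" r).getD "") 0 (· + 1))
        PySem.Dict.empty
      let correct : PySem.Dict String Nat := preds.foldl
        (fun d r =>
          if (List.lookup "final_scene" r).getD "" = (List.lookup "scene_type_gt" r).getD ""
          then d.modify ((List.lookup "scene_type_gt" r).getD "") 0 (· + 1) else d)
        PySem.Dict.empty
      rows ++ [((List.lookup "condition_name" em.2).getD "")
                 :: pvSceneClasses.map (fun cls => pvPct (correct.getD cls 0) (gt_counts.getD cls 0))]) []
  PySem.Str.join "\n" (lines ++ [pvMdTable headers rows, "", pvPlain, ""])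

-- ===== PORT B =====
def section_6_per_class_py_alt (metrics : List (String × List (String × String))) (all_preds : List (String × List (List (String × String)))) : String :=
  let rows : List String := metrics.foldl (fun rows em =>
    let preds := (List.lookup em.1 all_preds).getD []
    if preds = [] then rows
    else
      let cells : List String := ((List.lookup "condition_name" em.2).getD "")
        :: pvSceneClasses.map (fun cls =>
            let total := preds.countP (fun r => (List.lookup "scene_type_gt" r).getD "" == cls)
            let correct := (preds.filter (fun r => (List.lookup "scene_type_gt" r).getD "" == cls)).countP
                (fun r => (List.lookup "final_scene" r).getD "" == cls)
            pvPct correct total)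
      rows ++ ["| " ++ PySem.Str.join " | " cells ++ " |"]) []
  let table : String := PySem.Str.join "\n"
    ((("| " ++ PySem.Str.join " | " ("Condition" :: pvSceneClasses) ++ " |")
      :: ("|" ++ String.join (List.replicate (pvSceneClasses.length + 1) " --- |"))
      :: rows))
  PySem.Str.join "\n"
    ["## 6. Per-Class Impact", "",
     "Which scene classes benefit most from tool verification?", "",
     table, "", pvPlain, ""]

-- ===== PRECONDITION & SPEC =====
-- Pre_ excludes (a) inputs on which A raises KeyError — a looked-up record missing
-- "scene_type_gt"/"final_scene", or a condition with non-empty preds whose metrics entry lacks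
-- "condition_name" — and (b) association lists that repeat a key, where the Python-dict and
-- list views of the input disagree (Python's dict construction collapses duplicates).
def Pre_section_6_per_class_py (metrics : List (String × List (String × String))) (all_preds : List (String × List (List (String × String)))) : Prop :=
  (metrics.map Prod.fst).Nodup ∧ (all_preds.map Prod.fst).Nodup ∧
  ∀ em ∈ metrics,
    (List.lookup em.1 all_preds).getD [] ≠ [] →
      ((em.2.map Prod.fst).Nodup ∧ (List.lookup "condition_name" em.2).isSome = true ∧
       ∀ r ∈ (List.lookup em.1 all_preds).getD [],
         (r.map Prod.fst).Nodup ∧ (List.lookup "scene_type_gt" r).isSome = true ∧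
         (List.lookup "final_scene" r).isSome = true)
instance (metrics : List (String × List (String × String))) (all_preds : List (String × List (List (String × String)))) : Decidable (Pre_section_6_per_class_py metrics all_preds) := by unfold Pre_section_6_per_class_py; infer_instance

def pvWitness_section_6_per_class_py : (List (String × List (String × String))) × (List (String × List (List (String × String)))) :=
  ([("a", [("condition_name", "base")])],
   [("a", [[("scene_type_gt", "nominal"), ("final_scene", "nominal")]])])

def Spec_section_6_per_class_py (metrics : List (String × List (String × String))) (all_preds : List (String × List (List (String × String)))) (out : String) : Prop := out = section_6_per_class_py_alt metrics all_preds
instance (metrics : List (String × List (String × String))) (all_preds : List (String × List (List (String × String)))) (out : String) : Decidable (Spec_section_6_per_class_py metrics all_preds out) := by unfold Spec_section_6_per_class_py; infer_instance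

-- ===== CLAIM (what is proved, stated in full; the proofs are below) =====
def Claim_equal_section_6_per_class_py : Prop := ∀ (metrics : List (String × List (String × String))) (all_preds : List (String × List (List (String × String)))), Dom_section_6_per_class_py metrics all_preds → Pre_section_6_per_class_py metrics all_preds → Spec_section_6_per_class_py metrics all_preds (section_6_per_class_py metrics all_preds)

-- ===== LEMMAS AND PROOFS =====

-- A's unconditional per-record counter, read at x, is a start value plus a filtered count
theorem pv_cnt_all (preds : List (List (String × String)))
    (d : PySem.Dict String Nat) (x : String) :
    (preds.foldl (fun d r => d.modify ((List.lookup "scene_type_gt" r).getD "") 0 (· + 1)) d).getD x 0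
      = d.getD x 0 + preds.countP (fun r => (List.lookup "scene_type_gt" r).getD "" == x) := by
  induction preds generalizing d with
  | nil => simp
  | cons r tl ih =>
    simp only [List.foldl_cons, List.countP_cons, ih]
    by_cases hx : ((List.lookup "scene_type_gt" r).getD "") = x
    · simp [hx]; omega
    · simp [PySem.Dict.getD_modify, Ne.symm hx, hx]

-- A's conditional counter, read at x, is a start value plus a doubly filtered count
theorem pv_cnt_if (preds : List (List (String × String)))
    (d : PySem.Dict String Nat) (x : String) :
    (preds.foldl (fun d r =>
        if (List.lookup "final_scene" r).getD "" = (List.lookup "scene_type_gt" r).getD ""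
        then d.modify ((List.lookup "scene_type_gt" r).getD "") 0 (· + 1) else d) d).getD x 0
      = d.getD x 0 + preds.countP (fun r =>
          ((List.lookup "final_scene" r).getD "" == (List.lookup "scene_type_gt" r).getD "")
          && ((List.lookup "scene_type_gt" r).getD "" == x)) := by
  induction preds generalizing d with
  | nil => simp
  | cons r tl ih =>
    simp only [List.foldl_cons, List.countP_cons]
    by_cases hc : (List.lookup "final_scene" r).getD "" = (List.lookup "scene_type_gt" r).getD ""
    · by_cases hx : ((List.lookup "scene_type_gt" r).getD "") = x
      · simp [hc, hx, ih]; omega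
      · simp [hc, hx, ih, PySem.Dict.getD_modify, Ne.symm hx]
    · simp [hc, ih]

-- one table row: B's class-major filtered counts equal A's counter lookups
theorem pv_row (preds : List (List (String × String))) :
    pvSceneClasses.map (fun cls =>
        let total := preds.countP (fun r => (List.lookup "scene_type_gt" r).getD "" == cls)
        let correct := (preds.filter (fun r => (List.lookup "scene_type_gt" r).getD "" == cls)).countP
            (fun r => (List.lookup "final_scene" r).getD "" == cls)
        pvPct correct total)
    = pvSceneClasses.map (fun cls =>
        pvPct
          ((preds.foldl (fun d r =>
              if (List.lookup "final_scene" r).getD "" = (List.lookup "scene_type_gt" r).getD ""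
              then d.modify ((List.lookup "scene_type_gt" r).getD "") 0 (· + 1) else d)
            PySem.Dict.empty).getD cls 0)
          ((preds.foldl (fun d r => d.modify ((List.lookup "scene_type_gt" r).getD "") 0 (· + 1))
            PySem.Dict.empty).getD cls 0)) := by
  apply List.map_congr_left
  intro cls _
  rw [pv_cnt_all, pv_cnt_if]
  simp only [PySem.Dict.getD_empty, Nat.zero_add, List.countP_filter]
  congr 1
  apply List.countP_congr
  intro r _
  by_cases hg : (List.lookup "scene_type_gt" r).getD "" = cls
  · simp [hg]
  · simp [hg]

-- B's fold over metrics builds exactly A's rows, each already formatted as a line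
theorem pv_table_fold (all_preds : List (String × List (List (String × String))))
    (ms : List (String × List (String × String))) (rows : List (List String)) :
    ms.foldl (fun rows em =>
      let preds := (List.lookup em.1 all_preds).getD []
      if preds = [] then rows
      else
        let cells : List String := ((List.lookup "condition_name" em.2).getD "")
          :: pvSceneClasses.map (fun cls =>
              let total := preds.countP (fun r => (List.lookup "scene_type_gt" r).getD "" == cls)
              let correct := (preds.filter (fun r => (List.lookup "scene_type_gt" r).getD "" == cls)).countP
                  (fun r => (List.lookup "final_scene" r).getD "" == cls)
              pvPct correct total)
        rows ++ ["| " ++ PySem.Str.join " | " cells ++ " |"])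
      (rows.map (fun row => "| " ++ PySem.Str.join " | " row ++ " |"))
    = (ms.foldl (fun rows em =>
        let preds := (List.lookup em.1 all_preds).getD []
        if preds = [] then rows
        else
          let gt_counts : PySem.Dict String Nat := preds.foldl
            (fun d r => d.modify ((List.lookup "scene_type_gt" r).getD "") 0 (· + 1))
            PySem.Dict.empty
          let correct : PySem.Dict String Nat := preds.foldl
            (fun d r =>
              if (List.lookup "final_scene" r).getD "" = (List.lookup "scene_type_gt" r).getD ""
              then d.modify ((List.lookup "scene_type_gt" r).getD "") 0 (· + 1) else d)
            PySem.Dict.empty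
          rows ++ [((List.lookup "condition_name" em.2).getD "")
                     :: pvSceneClasses.map (fun cls => pvPct (correct.getD cls 0) (gt_counts.getD cls 0))]) rows).map
        (fun row => "| " ++ PySem.Str.join " | " row ++ " |") := by
  induction ms generalizing rows with
  | nil => rfl
  | cons em tl ih =>
    simp only [List.foldl_cons]
    by_cases hp : (List.lookup em.1 all_preds).getD [] = []
    · simp only [hp]
      exact ih rows
    · simp only [if_neg hp]
      rw [← ih (rows ++ [_])]
      congr 1
      simp only [List.map_append, List.map_cons, List.map_nil]
      rw [pv_row ((List.lookup em.1 all_preds).getD [])]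

theorem section_6_per_class_py_spec' (metrics : List (String × List (String × String)))
    (all_preds : List (String × List (List (String × String)))) :
    section_6_per_class_py metrics all_preds = section_6_per_class_py_alt metrics all_preds := by
  unfold section_6_per_class_py section_6_per_class_py_alt pvMdTable
  dsimp only
  have hsep : ("| " ++ PySem.Str.join " | " (("Condition" :: pvSceneClasses).map (fun _ => "---")) ++ " |")
      = "|" ++ String.join (List.replicate (pvSceneClasses.length + 1) " --- |") := by decide
  have htab := pv_table_fold all_preds metrics []
  simp only [List.map_nil] at htab
  rw [← htab, ← hsep]
  rfl

-- ===== VERDICT (by name: the statement is the Claim_ definition above) =====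
theorem section_6_per_class_py_spec : Claim_equal_section_6_per_class_py := by
  intro metrics all_preds _ _
  exact section_6_per_class_py_spec' metrics all_preds
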